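-- pv_equiv track=rewrite | github.com/gabrielDpadua21/python-words | src/treat/treat.py | treatFile
-- ===== SOURCE A (Python) =====
-- def treatFile(file):
--     numbers = [0, 1, 2, 3, 4, 5, 6, 7, 8, 9]
--     words = []
--     for line in file:
--         aux = True
--         for num in numbers:
--             if str(num) in line or line == "\n":
--                 aux = False
--                 break
--         if aux:
--             words.append(line.split())
--     return words
-- ===== SOURCE B (Python) =====
-- def treatFile(file):
--     # Stage 1: strip every decimal digit from every line.
--     delete_digits = str.maketrans('', '', '0123456789')
--     cleaned = [line.translate(delete_digits) for line in file]
--     # Stage 2: keep the lines the stripping left unchanged (and not a bare newline).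
--     return [c.split() for line, c in zip(file, cleaned) if c == line and line != "\n"]
-- ===== Notes on version B (the rewrite author's own statement) =====
-- stated objective: faster
-- what changed: Instead of A's per-line inner loop searching the line for each of the ten digit substrings, B first maps the whole file through a translate table that deletes digits, then keeps exactly the lines the deletion left unchanged (idempotence test), splitting those.
import Mathlib
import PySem

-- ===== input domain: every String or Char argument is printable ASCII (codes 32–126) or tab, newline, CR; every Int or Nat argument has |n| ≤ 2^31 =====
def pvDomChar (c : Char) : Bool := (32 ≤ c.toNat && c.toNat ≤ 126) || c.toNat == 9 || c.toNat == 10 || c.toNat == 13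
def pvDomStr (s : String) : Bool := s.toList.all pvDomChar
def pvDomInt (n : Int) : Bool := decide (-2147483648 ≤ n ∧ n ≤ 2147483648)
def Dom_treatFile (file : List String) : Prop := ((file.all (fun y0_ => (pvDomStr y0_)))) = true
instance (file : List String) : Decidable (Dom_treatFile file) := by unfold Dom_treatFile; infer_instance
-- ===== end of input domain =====

-- B replaces A's per-line inner loop (one substring search per digit value, with break) by a
-- two-stage pipeline: strip all digits from every line with a translate table, then keep the
-- lines the stripping left unchanged (and that are not a bare newline), splitting those.

-- ===== PORT A =====
-- inner 'for num in numbers: … break' loop; returns the final value of aux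
def treatAuxA (line : String) : List Int → Bool
  | [] => true
  | n :: rest =>
      if PySem.Str.isIn (PySem.Int.toStr n) line || line == "\n" then false
      else treatAuxA line rest

def treatFile (file : List String) : List (List String) :=
  file.foldl
    (fun words line =>
      if treatAuxA line [0, 1, 2, 3, 4, 5, 6, 7, 8, 9] then words ++ [PySem.Str.split₀ line]
      else words)
    []

-- ===== PORT B =====
-- line.translate(str.maketrans('', '', '0123456789')): the table only deletes the ten ASCII
-- digit code points and maps nothing else, so it is exactly 'drop the digit characters'.
def cleanLine (line : String) : String :=
  String.ofList (line.toList.filter (fun c => !(("0123456789".toList).contains c)))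

def treatFile_alt (file : List String) : List (List String) :=
  let cleaned := file.map cleanLine
  ((file.zip cleaned).filter (fun p => p.2 == p.1 && p.1 != "\n")).map
    (fun p => PySem.Str.split₀ p.2)

-- ===== PRECONDITION & SPEC =====
def Spec_treatFile (file : List String) (out : List (List String)) : Prop := out = treatFile_alt file
instance (file : List String) (out : List (List String)) : Decidable (Spec_treatFile file out) := by unfold Spec_treatFile; infer_instance

-- ===== CLAIM (what is proved, stated in full; the proofs are below) =====
def Claim_equal_treatFile : Prop := ∀ (file : List String), Dom_treatFile file → Spec_treatFile file (treatFile file)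

-- ===== LEMMAS AND PROOFS =====
theorem isIn_single_iff (c : Char) (s : String) :
    PySem.Str.isIn (String.ofList [c]) s = true ↔ c ∈ s.toList := by
  rw [PySem.Str.isIn_iff_infix]
  simpa using List.singleton_infix_iff c s.toList

-- 'stripping the digits changed nothing' ↔ no digit character occurs in the line
theorem cleanLine_beq_iff (line : String) :
    (cleanLine line == line) = true ↔
      ∀ c ∈ line.toList, c ∉ ("0123456789".toList) := by
  constructor
  · intro h c hc
    have : String.ofList (line.toList.filter (fun c => !(("0123456789".toList).contains c)))
        = line := by simpa [cleanLine] using h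
    have hfl : line.toList.filter (fun c => !(("0123456789".toList).contains c)) = line.toList := by
      have := congrArg String.toList this
      simpa using this
    have := (List.filter_eq_self.mp hfl) c hc
    simpa using this
  · intro h
    have hfl : line.toList.filter (fun c => !(("0123456789".toList).contains c)) = line.toList :=
      List.filter_eq_self.mpr (fun c hc => by simpa using h c hc)
    have hcl : cleanLine line = line := by unfold cleanLine; rw [hfl]; simp
    simp [hcl]

-- per-line agreement of the two keep-tests
theorem keep_eq (line : String) :
    ((cleanLine line == line) && (line != "\n")) = treatAuxA line [0, 1, 2, 3, 4, 5, 6, 7, 8, 9] := by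
  by_cases hn : line = "\n"
  · subst hn; decide
  · have hne : (line == "\n") = false := by simpa using hn
    have hbne : (line != "\n") = true := by simp [bne, hne]
    have hIn : ∀ c : Char, PySem.Str.isIn (String.ofList [c]) line = true ↔ c ∈ line.toList :=
      fun c => isIn_single_iff c line
    simp only [treatAuxA, hne, Bool.or_false, hbne, Bool.and_true]
    rw [show PySem.Int.toStr 0 = String.ofList ['0'] from rfl,
        show PySem.Int.toStr 1 = String.ofList ['1'] from rfl,
        show PySem.Int.toStr 2 = String.ofList ['2'] from rfl,
        show PySem.Int.toStr 3 = String.ofList ['3'] from rfl,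
        show PySem.Int.toStr 4 = String.ofList ['4'] from rfl,
        show PySem.Int.toStr 5 = String.ofList ['5'] from rfl,
        show PySem.Int.toStr 6 = String.ofList ['6'] from rfl,
        show PySem.Int.toStr 7 = String.ofList ['7'] from rfl,
        show PySem.Int.toStr 8 = String.ofList ['8'] from rfl,
        show PySem.Int.toStr 9 = String.ofList ['9'] from rfl]
    split_ifs with h0 h1 h2 h3 h4 h5 h6 h7 h8 h9
    · rw [Bool.eq_false_iff]
      intro hcl
      exact ((cleanLine_beq_iff line).mp hcl) '0' ((hIn '0').mp h0) (by decide)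
    · rw [Bool.eq_false_iff]
      intro hcl
      exact ((cleanLine_beq_iff line).mp hcl) '1' ((hIn '1').mp h1) (by decide)
    · rw [Bool.eq_false_iff]
      intro hcl
      exact ((cleanLine_beq_iff line).mp hcl) '2' ((hIn '2').mp h2) (by decide)
    · rw [Bool.eq_false_iff]
      intro hcl
      exact ((cleanLine_beq_iff line).mp hcl) '3' ((hIn '3').mp h3) (by decide)
    · rw [Bool.eq_false_iff]
      intro hcl
      exact ((cleanLine_beq_iff line).mp hcl) '4' ((hIn '4').mp h4) (by decide)
    · rw [Bool.eq_false_iff]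
      intro hcl
      exact ((cleanLine_beq_iff line).mp hcl) '5' ((hIn '5').mp h5) (by decide)
    · rw [Bool.eq_false_iff]
      intro hcl
      exact ((cleanLine_beq_iff line).mp hcl) '6' ((hIn '6').mp h6) (by decide)
    · rw [Bool.eq_false_iff]
      intro hcl
      exact ((cleanLine_beq_iff line).mp hcl) '7' ((hIn '7').mp h7) (by decide)
    · rw [Bool.eq_false_iff]
      intro hcl
      exact ((cleanLine_beq_iff line).mp hcl) '8' ((hIn '8').mp h8) (by decide)
    · rw [Bool.eq_false_iff]
      intro hcl
      exact ((cleanLine_beq_iff line).mp hcl) '9' ((hIn '9').mp h9) (by decide)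
    · apply (cleanLine_beq_iff line).mpr
      intro c hc hmem
      have hds : c = '0' ∨ c = '1' ∨ c = '2' ∨ c = '3' ∨ c = '4' ∨ c = '5' ∨ c = '6' ∨
          c = '7' ∨ c = '8' ∨ c = '9' := by
        have : c ∈ ['0','1','2','3','4','5','6','7','8','9'] := by simpa using hmem
        simpa using this
      rcases hds with h|h|h|h|h|h|h|h|h|h <;> subst h
      · exact h0 ((hIn _).mpr hc)
      · exact h1 ((hIn _).mpr hc)
      · exact h2 ((hIn _).mpr hc)
      · exact h3 ((hIn _).mpr hc)
      · exact h4 ((hIn _).mpr hc)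
      · exact h5 ((hIn _).mpr hc)
      · exact h6 ((hIn _).mpr hc)
      · exact h7 ((hIn _).mpr hc)
      · exact h8 ((hIn _).mpr hc)
      · exact h9 ((hIn _).mpr hc)

theorem alt_eq_filter_map (file : List String) :
    treatFile_alt file
      = (file.filter (fun l => treatAuxA l [0, 1, 2, 3, 4, 5, 6, 7, 8, 9])).map PySem.Str.split₀ := by
  induction file with
  | nil => rfl
  | cons l rest ih =>
    simp only [treatFile_alt, List.map_cons, List.zip_cons_cons, List.filter_cons] at *
    rw [keep_eq l]
    by_cases h : treatAuxA l [0, 1, 2, 3, 4, 5, 6, 7, 8, 9] = true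
    · have hcl : cleanLine l = l := by
        have : ((cleanLine l == l) && (l != "\n")) = true := by rw [keep_eq]; exact h
        have := (Bool.and_eq_true _ _).mp this
        exact beq_iff_eq.mp this.1
      simp [h, hcl, ih]
    · simp only [Bool.not_eq_true] at h
      simp [h, ih]

-- ===== VERDICT (by name: the statement is the Claim_ definition above) =====
theorem treatFile_spec : Claim_equal_treatFile := by
  intro file _
  unfold Spec_treatFile treatFile
  rw [PySem.List.foldl_append_if, alt_eq_filter_map]
  simp
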